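-- pv_equiv track=rewrite | github.com/nickovic/rtamt | rtamt/explanation/stl/discrete_time/explanations.py | explain_unsat_timed_historically
-- ===== SOURCE A (Python) =====
-- def explain_unsat_timed_historically(op_signal, intervals, a, b):
--     op_intervals = []
--     a = int(a)
--     b = int(b)
--     for begin, end in intervals:
--         begin = max(begin - b, 0)
--         end = max(end - a, 0)
--         state = False
--         for i in range(begin, end + 1):
--             if not state and op_signal[i] < 0:
--                 state = True
--                 start = i
--             elif state and op_signal[i] >= 0:
--                 state = False
--                 op_intervals.append([start, i - 1])
--         if state:
--             op_intervals.append([start, end])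
--     op_intervals = interval_union(op_intervals)
--     return op_intervals
--
-- def interval_union(intervals):
--     out = []
--     for begin, end in sorted(intervals):
--         if out and out[-1][1] >= begin - 1:
--             out[-1][1] = max(out[-1][1], end)
--         else:
--             out.append([begin, end])
--     return out
-- ===== SOURCE B (Python) =====
-- def explain_unsat_timed_historically(op_signal, intervals, a, b):
--     a = int(a)
--     b = int(b)
--     pts = set()
--     for begin, end in intervals:
--         pts.update(range(max(begin - b, 0), max(end - a, 0) + 1))
--     out = []
--     for i in sorted(pts):
--         if op_signal[i] < 0:
--             if out and out[-1][1] == i - 1: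
--                 out[-1][1] = i
--             else:
--                 out.append([i, i])
--     return out
-- ===== Notes on version B (the rewrite author's own statement) =====
-- stated objective: simpler
-- what changed: A runs a boolean state machine over each shifted interval collecting negative runs and then sorts and merges them with interval_union; B instead collects the set of all shifted scan indices and emits the maximal negative runs in one pass over the sorted set, needing no per-interval state machine and no trailing union step.
import Mathlib
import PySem

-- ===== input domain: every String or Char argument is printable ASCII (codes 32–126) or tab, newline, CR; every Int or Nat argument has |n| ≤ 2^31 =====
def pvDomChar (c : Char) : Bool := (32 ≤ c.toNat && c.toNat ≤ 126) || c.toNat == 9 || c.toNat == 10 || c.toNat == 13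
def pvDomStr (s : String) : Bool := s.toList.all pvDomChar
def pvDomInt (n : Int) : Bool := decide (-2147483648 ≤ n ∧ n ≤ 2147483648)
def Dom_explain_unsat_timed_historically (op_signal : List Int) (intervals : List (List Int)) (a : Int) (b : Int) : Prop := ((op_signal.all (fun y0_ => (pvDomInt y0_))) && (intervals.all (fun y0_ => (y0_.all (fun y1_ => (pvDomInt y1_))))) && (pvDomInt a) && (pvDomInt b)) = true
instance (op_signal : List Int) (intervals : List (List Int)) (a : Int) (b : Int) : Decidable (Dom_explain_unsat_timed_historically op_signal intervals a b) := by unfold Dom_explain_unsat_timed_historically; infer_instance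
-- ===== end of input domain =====

-- B replaces A's per-interval boolean state machine plus trailing sort-and-union by: collect the
-- set of all shifted scan indices, then one pass over the sorted set emitting the maximal negative
-- runs directly (objective: simpler; equal return values wherever Python A returns, i.e. on Pre_).

-- ===== PORT A =====

-- inner loop body; state = (state flag, start, op_intervals); op_signal[i] via pyGetD, exact under Pre_ (index in range)

def pvInnerStep (op_signal : List Int) (p : Bool × Int × List (List Int)) (i : Int) : Bool × Int × List (List Int) :=
  if !p.1 && decide (PySem.List.pyGetD op_signal i 0 < 0) then (true, i, p.2.2)
  else if p.1 && decide (0 ≤ PySem.List.pyGetD op_signal i 0) then (false, p.2.1, p.2.2 ++ [[p.2.1, i - 1]])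
  else p

-- after the inner loop: 'if state: op_intervals.append([start, end])'

-- after the inner loop: 'if state: op_intervals.append([start, end])'

def pvScanClose (end_ : Int) (r : Bool × Int × List (List Int)) : List (List Int) :=
  if r.1 then r.2.2 ++ [[r.2.1, end_]] else r.2.2

def pvScan (op_signal : List Int) (acc : List (List Int)) (begin_ end_ : Int) : List (List Int) :=
  pvScanClose end_ ((PySem.List.pyRange begin_ (end_ + 1) 1).foldl (pvInnerStep op_signal) (false, 0, acc))

-- one step of interval_union's loop; out[-1][1] = max(out[-1][1], end) rebuilds the last 2-element
-- row in place (exact: every row interval_union receives from A's loop is a 2-element list)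

def pvUnionStep (out : List (List Int)) (p : List Int) : List (List Int) :=
  match p with
  | [begin_, end_] =>
    match out.getLast? with
    | some lastIv =>
      if begin_ - 1 ≤ PySem.List.pyGetD lastIv 1 0 then
        out.dropLast ++ [[PySem.List.pyGetD lastIv 0 0, max (PySem.List.pyGetD lastIv 1 0) end_]]
      else out ++ [[begin_, end_]]
    | none => out ++ [[begin_, end_]]
  | _ => out

-- interval_union; Python's sorted() on 2-element int lists is the stable sort by the
-- lexicographic pair key (p[0], p[1]) — exact for the rows this function receives

def pvIntervalUnion (ivs : List (List Int)) : List (List Int) :=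
  (PySem.List.sorted ivs (fun p => toLex (PySem.List.pyGetD p 0 0, PySem.List.pyGetD p 1 0)) false).foldl pvUnionStep []

-- body of A's outer loop (unpacking a row that is not a 2-element list raises ValueError in
-- Python; excluded by Pre_)

def pvOuterStep (op_signal : List Int) (a b : Int) (acc : List (List Int)) (iv : List Int) : List (List Int) :=
  match iv with
  | [begin_, end_] => pvScan op_signal acc (max (begin_ - b) 0) (max (end_ - a) 0)
  | _ => acc

def explain_unsat_timed_historically (op_signal : List Int) (intervals : List (List Int)) (a : Int) (b : Int) : List (List Int) :=
  -- a = int(a), b = int(b) are identities on Int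
  pvIntervalUnion (intervals.foldl (pvOuterStep op_signal a b) [])

-- ===== PORT B =====

-- one step of B's single pass: skip non-negative points, extend the last run on a consecutive
-- index, otherwise open a new run

def pvMergeStep (op_signal : List Int) (out : List (List Int)) (i : Int) : List (List Int) :=
  if decide (PySem.List.pyGetD op_signal i 0 < 0) then
    match out.getLast? with
    | some lastIv =>
      if PySem.List.pyGetD lastIv 1 0 == i - 1 then
        out.dropLast ++ [[PySem.List.pyGetD lastIv 0 0, i]]
      else out ++ [[i, i]]
    | none => out ++ [[i, i]]
  else out

-- body of B's set-building loop (non-2-element rows raise ValueError in Python; excluded by Pre_)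

def pvPtsStep (a b : Int) (s : PySem.Set Int) (iv : List Int) : PySem.Set Int :=
  match iv with
  | [begin_, end_] => PySem.Set.update s (PySem.List.pyRange (max (begin_ - b) 0) (max (end_ - a) 0 + 1) 1)
  | _ => s

def explain_unsat_timed_historically_alt (op_signal : List Int) (intervals : List (List Int)) (a : Int) (b : Int) : List (List Int) :=
  (PySem.List.sorted (intervals.foldl (pvPtsStep a b) PySem.Set.empty) (fun x => x) false).foldl
    (pvMergeStep op_signal) []

-- ===== PRECONDITION & SPEC =====
-- Pre_ excludes exactly the inputs where Python A raises: a row of intervals that is not a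
-- 2-element list (ValueError on unpacking), or a nonempty shifted scan range reaching an index
-- ≥ len(op_signal) (IndexError); A returns normally on every other input.
def Pre_explain_unsat_timed_historically (op_signal : List Int) (intervals : List (List Int)) (a : Int) (b : Int) : Prop :=
  ∀ iv ∈ intervals, iv.length = 2 ∧
    (max (iv.getD 0 0 - b) 0 ≤ max (iv.getD 1 0 - a) 0 → max (iv.getD 1 0 - a) 0 < (op_signal.length : Int))
instance (op_signal : List Int) (intervals : List (List Int)) (a : Int) (b : Int) : Decidable (Pre_explain_unsat_timed_historically op_signal intervals a b) := by unfold Pre_explain_unsat_timed_historically; infer_instance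

def pvWitness_explain_unsat_timed_historically : List Int × List (List Int) × Int × Int := ([-1, 2, -3], [[0, 2]], 0, 0)

def Spec_explain_unsat_timed_historically (op_signal : List Int) (intervals : List (List Int)) (a : Int) (b : Int) (out : List (List Int)) : Prop := out = explain_unsat_timed_historically_alt op_signal intervals a b
instance (op_signal : List Int) (intervals : List (List Int)) (a : Int) (b : Int) (out : List (List Int)) : Decidable (Spec_explain_unsat_timed_historically op_signal intervals a b out) := by unfold Spec_explain_unsat_timed_historically; infer_instance

-- ===== CLAIM (what is proved, stated in full; the proofs are below) =====
def Claim_equal_explain_unsat_timed_historically : Prop := ∀ (op_signal : List Int) (intervals : List (List Int)) (a : Int) (b : Int), Dom_explain_unsat_timed_historically op_signal intervals a b → Pre_explain_unsat_timed_historically op_signal intervals a b → Spec_explain_unsat_timed_historically op_signal intervals a b (explain_unsat_timed_historically op_signal intervals a b)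

-- ===== LEMMAS AND PROOFS =====
-- Plan: both outputs are canonical block lists (pvOK: well-formed [s, e] blocks, pairwise
-- separated by a gap ≥ 2) covering the same set of integers (the scanned shifted indices with
-- negative signal value), and a canonical block list is determined by the set it covers.

def pvBlk (p : List Int) : Prop := ∃ s e : Int, p = [s, e] ∧ s ≤ e

def pvCov (out : List (List Int)) (i : Int) : Prop := ∃ p ∈ out, ∃ s e : Int, p = [s, e] ∧ s ≤ i ∧ i ≤ e

def pvR (p q : List Int) : Prop := PySem.List.pyGetD p 1 0 + 1 < PySem.List.pyGetD q 0 0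

def pvOK (out : List (List Int)) : Prop := (∀ p ∈ out, pvBlk p) ∧ out.Pairwise pvR

lemma pvCov_cons {p : List Int} {t : List (List Int)} {i : Int} :
    pvCov (p :: t) i ↔ (∃ s e : Int, p = [s, e] ∧ s ≤ i ∧ i ≤ e) ∨ pvCov t i := by
  unfold pvCov
  constructor
  · rintro ⟨p', hp', s, e, rfl, h1, h2⟩
    rcases List.mem_cons.mp hp' with rfl | hm
    · exact Or.inl ⟨s, e, rfl, h1, h2⟩
    · exact Or.inr ⟨_, hm, s, e, rfl, h1, h2⟩
  · rintro (⟨s, e, rfl, h1, h2⟩ | ⟨p', hm, s, e, rfl, h1, h2⟩)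
    · exact ⟨_, List.mem_cons_self, s, e, rfl, h1, h2⟩
    · exact ⟨_, List.mem_cons_of_mem _ hm, s, e, rfl, h1, h2⟩

lemma pvCov_append {xs ys : List (List Int)} {i : Int} :
    pvCov (xs ++ ys) i ↔ pvCov xs i ∨ pvCov ys i := by
  unfold pvCov
  constructor
  · rintro ⟨p', hp', s, e, rfl, h1, h2⟩
    rcases List.mem_append.mp hp' with hm | hm
    · exact Or.inl ⟨_, hm, s, e, rfl, h1, h2⟩
    · exact Or.inr ⟨_, hm, s, e, rfl, h1, h2⟩
  · rintro (⟨p', hm, s, e, rfl, h1, h2⟩ | ⟨p', hm, s, e, rfl, h1, h2⟩)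
    · exact ⟨_, List.mem_append_left _ hm, s, e, rfl, h1, h2⟩
    · exact ⟨_, List.mem_append_right _ hm, s, e, rfl, h1, h2⟩

lemma pvCov_singleton {s e i : Int} : pvCov [[s, e]] i ↔ s ≤ i ∧ i ≤ e := by
  unfold pvCov
  constructor
  · rintro ⟨p, hp, u, v, rfl, h1, h2⟩
    simp at hp
    obtain ⟨rfl, rfl⟩ := hp
    exact ⟨h1, h2⟩
  · rintro ⟨h1, h2⟩
    exact ⟨[s, e], by simp, s, e, rfl, h1, h2⟩

lemma pvOK_cons_min {p : List Int} {t : List (List Int)} {s e : Int}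
    (h : pvOK (p :: t)) (hp : p = [s, e]) :
    (∀ i, pvCov t i → e + 1 < i) ∧ (∀ i, pvCov (p :: t) i → s ≤ i) := by
  obtain ⟨hb, hw⟩ := h
  obtain ⟨s', e', he, hse⟩ := hb p (by simp)
  rw [hp] at he; injection he with h1 h2; injection h2 with h2 _; subst h1; subst h2
  have htail : ∀ i, pvCov t i → e + 1 < i := by
    intro i hi
    obtain ⟨q, hq, u, v, hquv, hu, hv⟩ := hi
    have hR := (List.pairwise_cons.mp hw).1 q hq
    rw [hp, hquv] at hR
    have h0 : PySem.List.pyGetD ([u, v] : List Int) 0 0 = u := rfl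
    have h1 : PySem.List.pyGetD ([s, e] : List Int) 1 0 = e := rfl
    unfold pvR at hR
    rw [h0, h1] at hR
    omega
  refine ⟨htail, ?_⟩
  intro i hi
  rcases pvCov_cons.mp (hp ▸ hi) with ⟨s', e', he', h1, h2⟩ | hc
  · injection he' with a1 a2; injection a2 with a2 _; omega
  · have := htail i hc; omega

lemma pvOK_tail {p : List Int} {t : List (List Int)} (h : pvOK (p :: t)) : pvOK t :=
  ⟨fun q hq => h.1 q (List.mem_cons_of_mem _ hq), (List.pairwise_cons.mp h.2).2⟩

lemma pvOK_unique : ∀ xs ys : List (List Int), pvOK xs → pvOK ys →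
    (∀ i, pvCov xs i ↔ pvCov ys i) → xs = ys := by
  intro xs
  induction xs with
  | nil =>
    intro ys _ hok hcov
    cases ys with
    | nil => rfl
    | cons q t =>
      obtain ⟨s, e, rfl, hse⟩ := hok.1 q (by simp)
      have : pvCov [] s := (hcov s).mpr ⟨[s, e], by simp, s, e, rfl, le_refl s, hse⟩
      simp [pvCov] at this
  | cons p xs' ih =>
    intro ys hx hy hcov
    obtain ⟨s1, e1, hp, hse1⟩ := hx.1 p (by simp)
    cases ys with
    | nil =>
      have : pvCov [] s1 := (hcov s1).mp ⟨p, by simp, s1, e1, hp, le_refl s1, hse1⟩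
      simp [pvCov] at this
    | cons q ys' =>
      obtain ⟨s2, e2, hq, hse2⟩ := hy.1 q (by simp)
      obtain ⟨hxt, hxmin⟩ := pvOK_cons_min hx hp
      obtain ⟨hyt, hymin⟩ := pvOK_cons_min hy hq
      have covx : ∀ i, s1 ≤ i → i ≤ e1 → pvCov (p :: xs') i :=
        fun i h1 h2 => ⟨p, by simp, s1, e1, hp, h1, h2⟩
      have covy : ∀ i, s2 ≤ i → i ≤ e2 → pvCov (q :: ys') i :=
        fun i h1 h2 => ⟨q, by simp, s2, e2, hq, h1, h2⟩
      have hs : s1 = s2 := by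
        have h1 := hymin s1 ((hcov s1).mp (covx s1 (le_refl _) hse1))
        have h2 := hxmin s2 ((hcov s2).mpr (covy s2 (le_refl _) hse2))
        omega
      have he : e1 = e2 := by
        rcases lt_trichotomy e1 e2 with h | h | h
        · -- e1+1 covered by ys head, must be covered by xs
          have hc : pvCov (p :: xs') (e1 + 1) := (hcov _).mpr (covy (e1 + 1) (by omega) (by omega))
          rcases pvCov_cons.mp hc with ⟨s', e', he', ha, hb⟩ | hc'
          · rw [hp] at he'; injection he' with a1 a2; injection a2 with a2 _; omega
          · have := hxt _ hc'; omega
        · exact h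
        · have hc : pvCov (q :: ys') (e2 + 1) := (hcov _).mp (covx (e2 + 1) (by omega) (by omega))
          rcases pvCov_cons.mp hc with ⟨s', e', he', ha, hb⟩ | hc'
          · rw [hq] at he'; injection he' with a1 a2; injection a2 with a2 _; omega
          · have := hyt _ hc'; omega
      have htails : ∀ i, pvCov xs' i ↔ pvCov ys' i := by
        intro i
        constructor
        · intro hi
          have hgt := hxt i hi
          rcases pvCov_cons.mp ((hcov i).mp (pvCov_cons.mpr (Or.inr hi))) with ⟨s', e', he', ha, hb⟩ | hc'
          · rw [hq] at he'; injection he' with a1 a2; injection a2 with a2 _; omega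
          · exact hc'
        · intro hi
          have hgt := hyt i hi
          rcases pvCov_cons.mp ((hcov i).mpr (pvCov_cons.mpr (Or.inr hi))) with ⟨s', e', he', ha, hb⟩ | hc'
          · rw [hp] at he'; injection he' with a1 a2; injection a2 with a2 _; omega
          · exact hc'
      have := ih ys' (pvOK_tail hx) (pvOK_tail hy) htails
      rw [hp, hq, hs, he, this]

lemma pvMergeStep_spec (sig : List Int) (acc : List (List Int)) (x : Int)
    (hok : pvOK acc) (hlt : ∀ j, pvCov acc j → j < x) :
    pvOK (pvMergeStep sig acc x) ∧
    (∀ i, pvCov (pvMergeStep sig acc x) i ↔ pvCov acc i ∨ (i = x ∧ PySem.List.pyGetD sig i 0 < 0)) := by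
  unfold pvMergeStep
  by_cases hneg : PySem.List.pyGetD sig x 0 < 0
  · simp only [hneg, decide_true, if_true]
    cases hlast : acc.getLast? with
    | none =>
      have hnil : acc = [] := List.getLast?_eq_none_iff.mp hlast
      subst hnil
      refine ⟨⟨?_, ?_⟩, ?_⟩
      · rintro p hp; simp at hp; exact ⟨x, x, hp, le_refl _⟩
      · simp
      · intro i
        simp only [List.nil_append]
        rw [pvCov_singleton]
        constructor
        · rintro ⟨h1, h2⟩; right; exact ⟨by omega, by rwa [show i = x by omega]⟩
        · rintro (h | ⟨rfl, _⟩)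
          · simp [pvCov] at h
          · exact ⟨le_refl _, le_refl _⟩
    | some lastIv =>
      obtain ⟨init, rfl⟩ := List.getLast?_eq_some_iff.mp hlast
      obtain ⟨ls, le, hl, hlsle⟩ := hok.1 lastIv (by simp)
      subst hl
      dsimp only
      have hdrop : (init ++ [[ls, le]] : List (List Int)).dropLast = init := by
        simp
      have hg1 : PySem.List.pyGetD ([ls, le] : List Int) 1 0 = le := rfl
      have hg0 : PySem.List.pyGetD ([ls, le] : List Int) 0 0 = ls := rfl
      have hpw := List.pairwise_append.mp hok.2
      have hinit : ∀ p ∈ init, pvR p [ls, le] := by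
        intro p hp; exact hpw.2.2 p hp [ls, le] (by simp)
      have hltle : le < x := hlt le (pvCov_append.mpr (Or.inr (pvCov_singleton.mpr ⟨hlsle, le_refl _⟩)))
      rw [hg1, hdrop, hg0]
      by_cases heq : le = x - 1
      · simp only [heq, beq_self_eq_true, if_true]
        refine ⟨⟨?_, ?_⟩, ?_⟩
        · intro p hp
          rcases List.mem_append.mp hp with hm | hm
          · exact hok.1 p (List.mem_append_left _ hm)
          · simp at hm; exact ⟨ls, x, hm, by omega⟩
        · rw [List.pairwise_append]
          refine ⟨hpw.1, by simp, ?_⟩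
          intro p hp q hq
          simp at hq; subst hq
          have := hinit p hp
          unfold pvR at this ⊢
          rw [hg0] at this
          rw [show PySem.List.pyGetD ([ls, x] : List Int) 0 0 = ls from rfl]
          exact this
        · intro i
          rw [pvCov_append, pvCov_singleton, pvCov_append, pvCov_singleton]
          constructor
          · rintro (h | ⟨h1, h2⟩)
            · exact Or.inl (Or.inl h)
            · by_cases hle : i ≤ x - 1
              · exact Or.inl (Or.inr ⟨h1, hle⟩)
              · right; refine ⟨by omega, ?_⟩; rwa [show i = x by omega]
          · rintro ((h | ⟨h1, h2⟩) | ⟨rfl, _⟩)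
            · exact Or.inl h
            · exact Or.inr ⟨h1, by omega⟩
            · exact Or.inr ⟨by omega, le_refl _⟩
      · have hne : (PySem.List.pyGetD ([ls, le] : List Int) 1 0 == x - 1) = false := by
          rw [hg1]; simp [heq]
        rw [hg1] at hne
        rw [hne]
        simp only [Bool.false_eq_true, if_false]
        refine ⟨⟨?_, ?_⟩, ?_⟩
        · intro p hp
          rcases List.mem_append.mp hp with hm | hm
          · exact hok.1 p hm
          · simp at hm; exact ⟨x, x, hm, le_refl _⟩
        · rw [List.pairwise_append]
          refine ⟨hok.2, by simp, ?_⟩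
          intro p hp q hq
          simp at hq; subst hq
          unfold pvR
          rw [show PySem.List.pyGetD ([x, x] : List Int) 0 0 = x from rfl]
          rcases List.mem_append.mp hp with hm | hm
          · have := hinit p hm
            unfold pvR at this
            rw [hg0] at this
            omega
          · simp at hm; subst hm
            rw [hg1]
            omega
        · intro i
          rw [pvCov_append, pvCov_singleton]
          constructor
          · rintro (h | ⟨h1, h2⟩)
            · exact Or.inl h
            · right; refine ⟨by omega, ?_⟩; rwa [show i = x by omega]
          · rintro (h | ⟨rfl, _⟩)
            · exact Or.inl h
            · exact Or.inr ⟨le_refl _, le_refl _⟩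
  · simp only [hneg, decide_false]
    refine ⟨hok, ?_⟩
    intro i
    constructor
    · exact Or.inl
    · rintro (h | ⟨rfl, h⟩)
      · exact h
      · exact absurd h hneg

lemma pvMergeFold (sig : List Int) : ∀ (l : List Int) (acc : List (List Int)),
    l.Pairwise (· < ·) → pvOK acc → (∀ j, pvCov acc j → ∀ x ∈ l, j < x) →
    pvOK (l.foldl (pvMergeStep sig) acc) ∧
      (∀ i, pvCov (l.foldl (pvMergeStep sig) acc) i ↔
        pvCov acc i ∨ (i ∈ l ∧ PySem.List.pyGetD sig i 0 < 0)) := by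
  intro l
  induction l with
  | nil => intro acc _ hok _; exact ⟨hok, by simp⟩
  | cons x l ih =>
    intro acc hpw hok hlt
    have hxl := (List.pairwise_cons.mp hpw).1
    have hpw' := (List.pairwise_cons.mp hpw).2
    simp only [List.foldl_cons]
    obtain ⟨hok', hcov'⟩ := pvMergeStep_spec sig acc x hok (fun j hj => hlt j hj x (by simp))
    have hlt' : ∀ j, pvCov (pvMergeStep sig acc x) j → ∀ y ∈ l, j < y := by
      intro j hj y hy
      rcases (hcov' j).mp hj with h | ⟨rfl, _⟩
      · exact lt_trans (hlt j h x (by simp)) (hxl y hy)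
      · exact hxl y hy
    obtain ⟨hokf, hcovf⟩ := ih (pvMergeStep sig acc x) hpw' hok' hlt'
    refine ⟨hokf, ?_⟩
    intro i
    rw [hcovf i, hcov' i, List.mem_cons]
    tauto

lemma pvUnionStep_spec (acc : List (List Int)) (s e : Int) (hse : s ≤ e)
    (hok : pvOK acc) (hstart : ∀ p ∈ acc, PySem.List.pyGetD p 0 0 ≤ s) :
    pvOK (pvUnionStep acc [s, e]) ∧
    (∀ i, pvCov (pvUnionStep acc [s, e]) i ↔ pvCov acc i ∨ (s ≤ i ∧ i ≤ e)) ∧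
    (∀ p ∈ pvUnionStep acc [s, e], PySem.List.pyGetD p 0 0 ≤ s) := by
  unfold pvUnionStep
  cases hlast : acc.getLast? with
  | none =>
    have hnil : acc = [] := List.getLast?_eq_none_iff.mp hlast
    subst hnil
    dsimp only
    refine ⟨⟨?_, by simp⟩, ?_, ?_⟩
    · rintro p hp; simp at hp; exact ⟨s, e, hp, hse⟩
    · intro i
      simp only [List.nil_append]
      rw [pvCov_singleton]
      constructor
      · exact Or.inr
      · rintro (h | h)
        · simp [pvCov] at h
        · exact h
    · intro p hp; simp at hp; subst hp
      rw [show PySem.List.pyGetD ([s, e] : List Int) 0 0 = s from rfl]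
  | some lastIv =>
    obtain ⟨init, rfl⟩ := List.getLast?_eq_some_iff.mp hlast
    obtain ⟨ls, le, hl, hlsle⟩ := hok.1 lastIv (by simp)
    subst hl
    dsimp only
    have hdrop : (init ++ [[ls, le]] : List (List Int)).dropLast = init := by simp
    have hg1 : PySem.List.pyGetD ([ls, le] : List Int) 1 0 = le := rfl
    have hg0 : PySem.List.pyGetD ([ls, le] : List Int) 0 0 = ls := rfl
    have hpw := List.pairwise_append.mp hok.2
    have hinit : ∀ p ∈ init, pvR p [ls, le] := fun p hp => hpw.2.2 p hp [ls, le] (by simp)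
    have hlss : ls ≤ s := by
      have := hstart [ls, le] (by simp)
      rwa [hg0] at this
    rw [hg1, hdrop, hg0]
    by_cases hc : s - 1 ≤ le
    · rw [if_pos hc]
      refine ⟨⟨?_, ?_⟩, ?_, ?_⟩
      · intro p hp
        rcases List.mem_append.mp hp with hm | hm
        · exact hok.1 p (List.mem_append_left _ hm)
        · simp at hm; exact ⟨ls, max le e, hm, by omega⟩
      · rw [List.pairwise_append]
        refine ⟨hpw.1, by simp, ?_⟩
        intro p hp q hq
        simp at hq; subst hq
        have := hinit p hp
        unfold pvR at this ⊢
        rw [hg0] at this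
        rwa [show PySem.List.pyGetD ([ls, max le e] : List Int) 0 0 = ls from rfl]
      · intro i
        rw [pvCov_append, pvCov_singleton, pvCov_append, pvCov_singleton]
        constructor
        · rintro (h | ⟨h1, h2⟩)
          · exact Or.inl (Or.inl h)
          · by_cases hle : i ≤ le
            · exact Or.inl (Or.inr ⟨h1, hle⟩)
            · exact Or.inr ⟨by omega, by omega⟩
        · rintro ((h | ⟨h1, h2⟩) | ⟨h1, h2⟩)
          · exact Or.inl h
          · exact Or.inr ⟨h1, by omega⟩
          · exact Or.inr ⟨by omega, by omega⟩
      · intro p hp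
        rcases List.mem_append.mp hp with hm | hm
        · exact hstart p (List.mem_append_left _ hm)
        · simp at hm; subst hm
          rw [show PySem.List.pyGetD ([ls, max le e] : List Int) 0 0 = ls from rfl]
          exact hlss
    · rw [if_neg hc]
      refine ⟨⟨?_, ?_⟩, ?_, ?_⟩
      · intro p hp
        rcases List.mem_append.mp hp with hm | hm
        · exact hok.1 p hm
        · simp at hm; exact ⟨s, e, hm, hse⟩
      · rw [List.pairwise_append]
        refine ⟨hok.2, by simp, ?_⟩
        intro p hp q hq
        simp at hq; subst hq
        unfold pvR
        rw [show PySem.List.pyGetD ([s, e] : List Int) 0 0 = s from rfl]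
        rcases List.mem_append.mp hp with hm | hm
        · have := hinit p hm
          unfold pvR at this
          rw [hg0] at this
          omega
        · simp at hm; subst hm
          rw [hg1]
          omega
      · intro i
        rw [pvCov_append, pvCov_singleton]
      · intro p hp
        rcases List.mem_append.mp hp with hm | hm
        · exact hstart p hm
        · simp at hm; subst hm
          rw [show PySem.List.pyGetD ([s, e] : List Int) 0 0 = s from rfl]

lemma pvUnionFold : ∀ (l acc : List (List Int)), (∀ p ∈ l, pvBlk p) →
    l.Pairwise (fun p q => PySem.List.pyGetD p 0 0 ≤ PySem.List.pyGetD q 0 0) →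
    pvOK acc → (∀ p ∈ acc, ∀ q ∈ l, PySem.List.pyGetD p 0 0 ≤ PySem.List.pyGetD q 0 0) →
    pvOK (l.foldl pvUnionStep acc) ∧
      (∀ i, pvCov (l.foldl pvUnionStep acc) i ↔ pvCov acc i ∨ pvCov l i) := by
  intro l
  induction l with
  | nil =>
    intro acc _ _ hok _
    refine ⟨hok, fun i => ?_⟩
    simp only [List.foldl_nil]
    constructor
    · exact Or.inl
    · rintro (h | h)
      · exact h
      · simp [pvCov] at h
  | cons p l ih =>
    intro acc hblk hpw hok hst
    obtain ⟨s, e, rfl, hse⟩ := hblk p (by simp)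
    have hg0 : PySem.List.pyGetD ([s, e] : List Int) 0 0 = s := rfl
    have hstep := pvUnionStep_spec acc s e hse hok (by
      intro p hp
      have := hst p hp [s, e] (by simp)
      rwa [hg0] at this)
    simp only [List.foldl_cons]
    have hpw' := (List.pairwise_cons.mp hpw).2
    have hps := (List.pairwise_cons.mp hpw).1
    obtain ⟨hokf, hcovf⟩ := ih (pvUnionStep acc [s, e]) (fun q hq => hblk q (by simp [hq]))
      hpw' hstep.1 (by
        intro p hp q hq
        calc PySem.List.pyGetD p 0 0 ≤ s := hstep.2.2 p hp
          _ ≤ _ := by have := hps q hq; rwa [hg0] at this)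
    refine ⟨hokf, fun i => ?_⟩
    rw [hcovf i, hstep.2.1 i, pvCov_cons]
    constructor
    · rintro ((h | h) | h)
      · exact Or.inl h
      · right; left; exact ⟨s, e, rfl, h.1, h.2⟩
      · exact Or.inr (Or.inr h)
    · rintro (h | ⟨s', e', he', h1, h2⟩ | h)
      · exact Or.inl (Or.inl h)
      · left; right
        injection he' with a1 a2; injection a2 with a2 _
        subst a1; subst a2
        exact ⟨h1, h2⟩
      · exact Or.inr h

lemma pvScanFold (sig : List Int) (s : Int) (acc : List (List Int)) : ∀ n : Nat,
    ∃ ns : List (List Int),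
      (((PySem.List.pyRange s (s + n) 1).foldl (pvInnerStep sig) (false, 0, acc)).2.2 = acc ++ ns) ∧
      (∀ p ∈ ns, pvBlk p) ∧
      ((((PySem.List.pyRange s (s + n) 1).foldl (pvInnerStep sig) (false, 0, acc)).1 = true) →
        s ≤ ((PySem.List.pyRange s (s + n) 1).foldl (pvInnerStep sig) (false, 0, acc)).2.1 ∧
        ((PySem.List.pyRange s (s + n) 1).foldl (pvInnerStep sig) (false, 0, acc)).2.1 ≤ s + n - 1 ∧
        (∀ j, ((PySem.List.pyRange s (s + n) 1).foldl (pvInnerStep sig) (false, 0, acc)).2.1 ≤ j → j ≤ s + n - 1 →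
          PySem.List.pyGetD sig j 0 < 0)) ∧
      (∀ i, (pvCov ns i ∨
          ((((PySem.List.pyRange s (s + n) 1).foldl (pvInnerStep sig) (false, 0, acc)).1 = true) ∧
            ((PySem.List.pyRange s (s + n) 1).foldl (pvInnerStep sig) (false, 0, acc)).2.1 ≤ i ∧ i ≤ s + n - 1)) ↔
        (s ≤ i ∧ i ≤ s + n - 1 ∧ PySem.List.pyGetD sig i 0 < 0)) := by
  intro n
  induction n with
  | zero =>
    refine ⟨[], ?_, by simp, ?_, ?_⟩
    · rw [show s + (0 : Nat) = s by omega, PySem.List.pyRange_one_eq_nil (le_refl s)]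
      simp
    · rw [show s + (0 : Nat) = s by omega, PySem.List.pyRange_one_eq_nil (le_refl s)]
      simp
    · intro i
      rw [show s + (0 : Nat) = s by omega, PySem.List.pyRange_one_eq_nil (le_refl s)]
      simp only [List.foldl_nil]
      constructor
      · rintro (h | ⟨h, _⟩)
        · simp [pvCov] at h
        · simp at h
      · rintro ⟨h1, h2, _⟩; omega
  | succ n ihn =>
    obtain ⟨ns, hacc, hblk, hopen, hcov⟩ := ihn
    set t : Int := s + n with ht
    have hsplit : PySem.List.pyRange s (s + (n + 1 : Nat)) 1 = PySem.List.pyRange s (s + n) 1 ++ [t] := by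
      rw [show s + ((n : Nat) + 1 : Nat) = t + 1 by push_cast; omega]
      rw [PySem.List.pyRange_one_succ_right (by omega)]
    rw [hsplit, List.foldl_append]
    set rn := (PySem.List.pyRange s (s + n) 1).foldl (pvInnerStep sig) (false, 0, acc) with hrn
    simp only [List.foldl_cons, List.foldl_nil]
    have hbound : (s + ((n : Nat) + 1 : Nat) : Int) - 1 = t := by push_cast; omega
    by_cases hneg : PySem.List.pyGetD sig t 0 < 0
    · cases hst : rn.1 with
      | false =>
        have hstep : pvInnerStep sig rn t = (true, t, rn.2.2) := by
          unfold pvInnerStep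
          rw [hst]
          simp [hneg]
        rw [hstep]
        dsimp only
        rw [hbound]
        refine ⟨ns, hacc, hblk, ?_, ?_⟩
        · intro _
          refine ⟨by omega, by omega, ?_⟩
          intro j h1 h2
          have : j = t := by omega
          rwa [this]
        · intro i
          have hc := hcov i
          simp only [hst, Bool.false_eq_true, false_and, or_false] at hc
          simp only [true_and]
          constructor
          · rintro (h | ⟨h1, h2⟩)
            · have := hc.mp h; omega
            · have : i = t := by omega
              subst this
              exact ⟨by omega, by omega, hneg⟩
          · rintro ⟨h1, h2, h3⟩
            by_cases hit : i ≤ t - 1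
            · exact Or.inl (hc.mpr ⟨h1, hit, h3⟩)
            · right; omega
      | true =>
        have hstep : pvInnerStep sig rn t = rn := by
          unfold pvInnerStep
          rw [hst]
          have : ¬ (0 ≤ PySem.List.pyGetD sig t 0) := by omega
          simp [this]
        rw [hstep, hbound]
        obtain ⟨ho1, ho2, ho3⟩ := hopen hst
        refine ⟨ns, hacc, hblk, ?_, ?_⟩
        · intro _
          refine ⟨ho1, by omega, ?_⟩
          intro j h1 h2
          by_cases hj : j ≤ t - 1
          · exact ho3 j h1 hj
          · have : j = t := by omega
            rwa [this]
        · intro i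
          have hc := hcov i
          simp only [hst, true_and] at hc ⊢
          constructor
          · rintro (h | ⟨h1, h2⟩)
            · have := hc.mp (Or.inl h); omega
            · by_cases hit : i ≤ t - 1
              · have := hc.mp (Or.inr ⟨h1, hit⟩); omega
              · have : i = t := by omega
                subst this
                exact ⟨by omega, by omega, hneg⟩
          · rintro ⟨h1, h2, h3⟩
            by_cases hit : i ≤ t - 1
            · rcases hc.mpr ⟨h1, hit, h3⟩ with h | ⟨hA, hB⟩
              · exact Or.inl h
              · right; exact ⟨hA, by omega⟩
            · have : i = t := by omega
              subst this
              exact Or.inr ⟨by omega, by omega⟩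
    · cases hst : rn.1 with
      | false =>
        have hstep : pvInnerStep sig rn t = rn := by
          unfold pvInnerStep
          rw [hst]
          simp [hneg]
        rw [hstep, hbound]
        refine ⟨ns, hacc, hblk, by rw [hst]; simp, ?_⟩
        intro i
        have hc := hcov i
        simp only [hst, Bool.false_eq_true, false_and, or_false] at hc ⊢
        rw [hc]
        constructor
        · rintro ⟨h1, h2, h3⟩; exact ⟨h1, by omega, h3⟩
        · rintro ⟨h1, h2, h3⟩
          refine ⟨h1, ?_, h3⟩
          have : i ≠ t := by rintro rfl; exact hneg h3
          omega
      | true =>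
        obtain ⟨ho1, ho2, ho3⟩ := hopen hst
        have hstep : pvInnerStep sig rn t = (false, rn.2.1, rn.2.2 ++ [[rn.2.1, t - 1]]) := by
          unfold pvInnerStep
          rw [hst]
          have h0 : (0 ≤ PySem.List.pyGetD sig t 0) := by omega
          simp [hneg, h0]
        rw [hstep]
        dsimp only
        rw [hbound]
        refine ⟨ns ++ [[rn.2.1, t - 1]], by rw [hacc, List.append_assoc], ?_, by simp, ?_⟩
        · intro p hp
          rcases List.mem_append.mp hp with hm | hm
          · exact hblk p hm
          · simp at hm; exact ⟨rn.2.1, t - 1, hm, by omega⟩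
        · intro i
          simp only [Bool.false_eq_true, false_and, or_false]
          rw [pvCov_append, pvCov_singleton]
          have hc := hcov i
          simp only [hst, true_and] at hc
          constructor
          · rintro (h | ⟨h1, h2⟩)
            · have := hc.mp (Or.inl h); omega
            · have := hc.mp (Or.inr ⟨h1, by omega⟩)
              omega
          · rintro ⟨h1, h2, h3⟩
            have hit : i ≤ t - 1 := by
              have : i ≠ t := by rintro rfl; exact hneg h3
              omega
            rcases hc.mpr ⟨h1, hit, h3⟩ with h | ⟨hA, hB⟩
            · exact Or.inl h
            · exact Or.inr ⟨hA, hB⟩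

lemma pvScan_spec (sig : List Int) (acc : List (List Int)) (s e : Int) :
    ∃ ns : List (List Int), pvScan sig acc s e = acc ++ ns ∧ (∀ p ∈ ns, pvBlk p) ∧
      (∀ i, pvCov ns i ↔ (s ≤ i ∧ i ≤ e ∧ PySem.List.pyGetD sig i 0 < 0)) := by
  by_cases hle : s ≤ e + 1
  · obtain ⟨ns, hacc, hblk, hopen, hcov⟩ := pvScanFold sig s acc (e + 1 - s).toNat
    have hn : s + ((e + 1 - s).toNat : Int) = e + 1 := by omega
    rw [hn] at hacc hopen hcov
    unfold pvScan pvScanClose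
    set r := (PySem.List.pyRange s (e + 1) 1).foldl (pvInnerStep sig) (false, 0, acc) with hr
    cases hst : r.1 with
    | false =>
      simp only [Bool.false_eq_true, if_false]
      refine ⟨ns, hacc, hblk, ?_⟩
      intro i
      have hc := hcov i
      simp only [hst, Bool.false_eq_true, false_and, or_false] at hc
      rw [hc]
      constructor
      · rintro ⟨h1, h2, h3⟩; exact ⟨h1, by omega, h3⟩
      · rintro ⟨h1, h2, h3⟩; exact ⟨h1, by omega, h3⟩
  -- open run at the end gets closed with [start, e]
    | true =>
      simp only [if_true]
      obtain ⟨ho1, ho2, ho3⟩ := hopen hst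
      refine ⟨ns ++ [[r.2.1, e]], by rw [hacc, List.append_assoc], ?_, ?_⟩
      · intro p hp
        rcases List.mem_append.mp hp with hm | hm
        · exact hblk p hm
        · simp at hm; exact ⟨r.2.1, e, hm, by omega⟩
      · intro i
        rw [pvCov_append, pvCov_singleton]
        have hc := hcov i
        simp only [hst, true_and] at hc
        constructor
        · rintro (h | ⟨h1, h2⟩)
          · have := hc.mp (Or.inl h); omega
          · have := hc.mp (Or.inr ⟨h1, by omega⟩); omega
        · rintro ⟨h1, h2, h3⟩
          rcases hc.mpr ⟨h1, by omega, h3⟩ with h | ⟨hA, hB⟩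
          · exact Or.inl h
          · exact Or.inr ⟨hA, by omega⟩
  · unfold pvScan pvScanClose
    rw [PySem.List.pyRange_one_eq_nil (by omega)]
    simp only [List.foldl_nil]
    refine ⟨[], by simp, by simp, ?_⟩
    intro i
    constructor
    · intro h; simp [pvCov] at h
    · rintro ⟨h1, h2, _⟩; omega

lemma pvOuter_spec (sig : List Int) (a b : Int) : ∀ (ivs : List (List Int)) (acc : List (List Int)),
    ∃ ns, ivs.foldl (pvOuterStep sig a b) acc = acc ++ ns ∧ (∀ p ∈ ns, pvBlk p) ∧
      (∀ i, pvCov ns i ↔ (PySem.List.pyGetD sig i 0 < 0 ∧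
        ∃ iv ∈ ivs, ∃ s0 e0 : Int, iv = [s0, e0] ∧ max (s0 - b) 0 ≤ i ∧ i ≤ max (e0 - a) 0)) := by
  intro ivs
  induction ivs with
  | nil =>
    intro acc
    refine ⟨[], by simp, by simp, ?_⟩
    intro i
    constructor
    · intro h; simp [pvCov] at h
    · rintro ⟨_, iv, hm, _⟩; simp at hm
  | cons iv ivs ih =>
    intro acc
    rcases iv with _ | ⟨x, _ | ⟨y, _ | ⟨z, rest⟩⟩⟩
    · obtain ⟨ns, h1, h2, h3⟩ := ih acc
      refine ⟨ns, by simpa [pvOuterStep] using h1, h2, ?_⟩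
      intro i
      rw [h3 i]
      constructor
      · rintro ⟨hn, iv, hm, hrest⟩; exact ⟨hn, iv, by simp [hm], hrest⟩
      · rintro ⟨hn, iv, hm, s0, e0, hiv, hrest⟩
        rcases List.mem_cons.mp hm with rfl | hm'
        · simp at hiv
        · exact ⟨hn, iv, hm', s0, e0, hiv, hrest⟩
    · obtain ⟨ns, h1, h2, h3⟩ := ih acc
      refine ⟨ns, by simpa [pvOuterStep] using h1, h2, ?_⟩
      intro i
      rw [h3 i]
      constructor
      · rintro ⟨hn, iv, hm, hrest⟩; exact ⟨hn, iv, by simp [hm], hrest⟩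
      · rintro ⟨hn, iv, hm, s0, e0, hiv, hrest⟩
        rcases List.mem_cons.mp hm with rfl | hm'
        · simp at hiv
        · exact ⟨hn, iv, hm', s0, e0, hiv, hrest⟩
    · -- the 2-element row [x, y]
      obtain ⟨ns1, hs1, hb1, hc1⟩ := pvScan_spec sig acc (max (x - b) 0) (max (y - a) 0)
      obtain ⟨ns2, h1, h2, h3⟩ := ih (pvScan sig acc (max (x - b) 0) (max (y - a) 0))
      refine ⟨ns1 ++ ns2, ?_, ?_, ?_⟩
      · simp only [List.foldl_cons, pvOuterStep]
        rw [h1, hs1, List.append_assoc]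
      · intro p hp
        rcases List.mem_append.mp hp with hm | hm
        · exact hb1 p hm
        · exact h2 p hm
      · intro i
        rw [pvCov_append, hc1 i, h3 i]
        constructor
        · rintro (⟨ha1, ha2, ha3⟩ | ⟨hn, iv, hm, hrest⟩)
          · exact ⟨ha3, [x, y], by simp, x, y, rfl, ha1, ha2⟩
          · exact ⟨hn, iv, by simp [hm], hrest⟩
        · rintro ⟨hn, iv, hm, s0, e0, hiv, hr1, hr2⟩
          rcases List.mem_cons.mp hm with rfl | hm'
          · left
            injection hiv with a1 a2; injection a2 with a2 _
            subst a1; subst a2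
            exact ⟨hr1, hr2, hn⟩
          · exact Or.inr ⟨hn, iv, hm', s0, e0, hiv, hr1, hr2⟩
    · obtain ⟨ns, h1, h2, h3⟩ := ih acc
      refine ⟨ns, by simpa [pvOuterStep] using h1, h2, ?_⟩
      intro i
      rw [h3 i]
      constructor
      · rintro ⟨hn, iv, hm, hrest⟩; exact ⟨hn, iv, by simp [hm], hrest⟩
      · rintro ⟨hn, iv, hm, s0, e0, hiv, hrest⟩
        rcases List.mem_cons.mp hm with rfl | hm'
        · simp at hiv
        · exact ⟨hn, iv, hm', s0, e0, hiv, hrest⟩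

lemma pvPts_spec (a b : Int) : ∀ (ivs : List (List Int)) (st : PySem.Set Int), st.Nodup →
    (ivs.foldl (pvPtsStep a b) st).Nodup ∧
    (∀ x : Int, x ∈ ivs.foldl (pvPtsStep a b) st ↔ x ∈ st ∨
      (∃ iv ∈ ivs, ∃ s0 e0 : Int, iv = [s0, e0] ∧ max (s0 - b) 0 ≤ x ∧ x ≤ max (e0 - a) 0)) := by
  intro ivs
  induction ivs with
  | nil =>
    intro st hnd
    refine ⟨hnd, fun x => ?_⟩
    simp
  | cons iv ivs ih =>
    intro st hnd
    rcases iv with _ | ⟨x0, _ | ⟨y0, _ | ⟨z0, rest⟩⟩⟩ <;>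
      simp only [List.foldl_cons, pvPtsStep]
    case nil =>
      obtain ⟨h1, h2⟩ := ih st hnd
      refine ⟨h1, fun x => ?_⟩
      rw [h2 x]
      constructor
      · rintro (h | ⟨iv, hm, hrest⟩)
        · exact Or.inl h
        · exact Or.inr ⟨iv, by simp [hm], hrest⟩
      · rintro (h | ⟨iv, hm, s0, e0, hiv, hrest⟩)
        · exact Or.inl h
        · rcases List.mem_cons.mp hm with rfl | hm'
          · simp at hiv
          · exact Or.inr ⟨iv, hm', s0, e0, hiv, hrest⟩
    case cons.nil =>
      obtain ⟨h1, h2⟩ := ih st hnd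
      refine ⟨h1, fun x => ?_⟩
      rw [h2 x]
      constructor
      · rintro (h | ⟨iv, hm, hrest⟩)
        · exact Or.inl h
        · exact Or.inr ⟨iv, by simp [hm], hrest⟩
      · rintro (h | ⟨iv, hm, s0, e0, hiv, hrest⟩)
        · exact Or.inl h
        · rcases List.mem_cons.mp hm with rfl | hm'
          · simp at hiv
          · exact Or.inr ⟨iv, hm', s0, e0, hiv, hrest⟩
    case cons.cons.nil =>
      obtain ⟨h1, h2⟩ := ih (PySem.Set.update st (PySem.List.pyRange (max (x0 - b) 0) (max (y0 - a) 0 + 1) 1))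
        (PySem.Set.nodup_update st _ hnd)
      refine ⟨h1, fun x => ?_⟩
      rw [h2 x, PySem.Set.mem_update, PySem.List.mem_pyRange_one]
      constructor
      · rintro ((h | ⟨hr1, hr2⟩) | ⟨iv, hm, hrest⟩)
        · exact Or.inl h
        · exact Or.inr ⟨[x0, y0], by simp, x0, y0, rfl, hr1, by omega⟩
        · exact Or.inr ⟨iv, by simp [hm], hrest⟩
      · rintro (h | ⟨iv, hm, s0, e0, hiv, hr1, hr2⟩)
        · exact Or.inl (Or.inl h)
        · rcases List.mem_cons.mp hm with rfl | hm'
          · injection hiv with a1 a2; injection a2 with a2 _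
            subst a1; subst a2
            exact Or.inl (Or.inr ⟨hr1, by omega⟩)
          · exact Or.inr ⟨iv, hm', s0, e0, hiv, hr1, hr2⟩
    case cons.cons.cons =>
      obtain ⟨h1, h2⟩ := ih st hnd
      refine ⟨h1, fun x => ?_⟩
      rw [h2 x]
      constructor
      · rintro (h | ⟨iv, hm, hrest⟩)
        · exact Or.inl h
        · exact Or.inr ⟨iv, by simp [hm], hrest⟩
      · rintro (h | ⟨iv, hm, s0, e0, hiv, hrest⟩)
        · exact Or.inl h
        · rcases List.mem_cons.mp hm with rfl | hm'
          · simp at hiv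
          · exact Or.inr ⟨iv, hm', s0, e0, hiv, hrest⟩

lemma pvSorted_lt (l : List Int) (h : l.Nodup) :
    (PySem.List.sorted l (fun x => x) false).Pairwise (· < ·) := by
  have h1 := PySem.List.sorted_pairwise (xs := l) (key := fun x : Int => x)
  have h2 : (PySem.List.sorted l (fun x : Int => x) false).Nodup :=
    (PySem.List.sorted_perm l (fun x : Int => x) false).nodup_iff.mpr h
  exact (h1.and h2).imp (fun hx => lt_of_le_of_ne hx.1 hx.2)

lemma pvCov_congr_mem {xs ys : List (List Int)} (h : ∀ p, p ∈ xs ↔ p ∈ ys) (i : Int) :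
    pvCov xs i ↔ pvCov ys i := by
  unfold pvCov
  constructor <;> rintro ⟨p, hp, s, e, rfl, h1, h2⟩
  · exact ⟨_, (h _).mp hp, s, e, rfl, h1, h2⟩
  · exact ⟨_, (h _).mpr hp, s, e, rfl, h1, h2⟩

lemma pvIntervalUnion_spec (ivs : List (List Int)) (hblk : ∀ p ∈ ivs, pvBlk p) :
    pvOK (pvIntervalUnion ivs) ∧ ∀ i, pvCov (pvIntervalUnion ivs) i ↔ pvCov ivs i := by
  unfold pvIntervalUnion
  set key := fun p : List Int => toLex (PySem.List.pyGetD p 0 0, PySem.List.pyGetD p 1 0) with hkey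
  have hperm : (PySem.List.sorted ivs key false).Perm ivs := PySem.List.sorted_perm ivs key false
  have hblk' : ∀ p ∈ PySem.List.sorted ivs key false, pvBlk p := fun p hp => hblk p (hperm.subset hp)
  have hpw : (PySem.List.sorted ivs key false).Pairwise
      (fun p q => PySem.List.pyGetD p 0 0 ≤ PySem.List.pyGetD q 0 0) := by
    have := PySem.List.sorted_pairwise (xs := ivs) (key := key)
    refine this.imp ?_
    intro p q hle
    rw [hkey] at hle
    rcases (Prod.Lex.toLex_le_toLex).mp hle with h | ⟨h, _⟩
    · exact le_of_lt h
    · exact le_of_eq h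
  obtain ⟨hok, hcov⟩ := pvUnionFold (PySem.List.sorted ivs key false) [] hblk' hpw
    ⟨by simp, by simp⟩ (by simp)
  refine ⟨hok, fun i => ?_⟩
  rw [hcov i, pvCov_congr_mem (xs := PySem.List.sorted ivs key false) (ys := ivs) (fun p => hperm.mem_iff) i]
  constructor
  · rintro (h | h)
    · simp [pvCov] at h
    · exact h
  · exact Or.inr

lemma pvFinal (op_signal : List Int) (intervals : List (List Int)) (a : Int) (b : Int) :
    explain_unsat_timed_historically op_signal intervals a b = explain_unsat_timed_historically_alt op_signal intervals a b := by
  unfold explain_unsat_timed_historically explain_unsat_timed_historically_alt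
  obtain ⟨runs, hruns, hblkruns, hcovruns⟩ := pvOuter_spec op_signal a b intervals []
  rw [hruns, List.nil_append]
  obtain ⟨hokA, hcovA⟩ := pvIntervalUnion_spec runs hblkruns
  obtain ⟨hnodup, hmem⟩ := pvPts_spec a b intervals PySem.Set.empty (by simp [PySem.Set.empty])
  have hstrict := pvSorted_lt _ hnodup
  obtain ⟨hokB, hcovB⟩ := pvMergeFold op_signal
    (PySem.List.sorted (intervals.foldl (pvPtsStep a b) PySem.Set.empty) (fun x => x) false) []
    hstrict ⟨by simp, by simp⟩ (by simp [pvCov])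
  apply pvOK_unique _ _ hokA hokB
  intro i
  simp only [PySem.List.mem_sorted] at hcovB
  rw [hcovA i, hcovB i, hcovruns i]
  constructor
  · rintro ⟨hn, hex⟩
    exact Or.inr ⟨(hmem i).mpr (Or.inr hex), hn⟩
  · rintro (h | ⟨hm, hn⟩)
    · simp [pvCov] at h
    · rcases (hmem i).mp hm with h | h
      · simp [PySem.Set.empty] at h
      · exact ⟨hn, h⟩

-- ===== VERDICT (by name: the statement is the Claim_ definition above) =====
theorem explain_unsat_timed_historically_spec : Claim_equal_explain_unsat_timed_historically := by
  intro op_signal intervals a b _ _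
  exact pvFinal op_signal intervals a b
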